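-- pv_equiv track=rewrite | github.com/Segzman/hermes | bot/apple.py | _parse_alarm_minutes
-- ===== SOURCE A (Python) =====
-- def _ics_lines(data: str) -> list[str]:
--     """
--     Unfold ICS long lines per RFC 5545 Section 3.1.
--
--     ICS uses "line folding" where long lines are broken with a CRLF followed
--     by a single whitespace character. This function reassembles them into
--     logical lines for easier parsing.
--     """
--     unfolded: list[str] = []
--     for raw_line in (data or "").splitlines():
--         # Lines starting with space or tab are continuations of the previous line
--         if raw_line[:1] in {" ", "\t"} and unfolded:
--             unfolded[-1] += raw_line[1:]
--         else:
--             unfolded.append(raw_line)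
--     return unfolded
--
-- def _extract_ics_fields(data: str, field: str) -> list[str]:
--     """
--     Extract all values for a repeating ICS property (e.g. ATTENDEE).
--
--     Unlike _extract_ics_field which returns the first match, this returns
--     all matching values as a list.
--     """
--     values = []
--     prefix = f"{field}:"
--     for raw_line in _ics_lines(data):
--         line = raw_line.strip()
--         if line.startswith(prefix):
--             values.append(line[len(prefix):].strip())
--         elif line.startswith(f"{field};") and ":" in line:
--             values.append(line.split(":", 1)[1].strip())
--     return values
--
-- def _parse_alarm_minutes(data: str) -> int:
--     """
--     Extract the alarm trigger duration from ICS data.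
--
--     Looks for TRIGGER:-PTnM patterns in VALARM blocks.
--     The "-PT" prefix means "before", and "M" means minutes.
--     """
--     for value in _extract_ics_fields(data, "TRIGGER"):
--         text = value.strip().upper()
--         # "-PT30M" means 30 minutes before the event/due time
--         if text.startswith("-PT") and text.endswith("M"):
--             try:
--                 return int(text[3:-1])
--             except ValueError:
--                 continue
--     return 0
-- ===== SOURCE B (Python) =====
-- def _try_trigger_line(line: str):
--     """Check one unfolded logical line; return its alarm minutes or None."""
--     line = line.strip()
--     if line.startswith("TRIGGER:"):
--         value = line[len("TRIGGER:"):]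
--     elif line.startswith("TRIGGER;") and ":" in line:
--         value = line.split(":", 1)[1]
--     else:
--         return None
--     text = value.strip().upper()
--     if text.startswith("-PT") and text.endswith("M"):
--         try:
--             return int(text[3:-1])
--         except ValueError:
--             return None
--     return None
--
--
-- def _parse_alarm_minutes(data: str) -> int:
--     # Single streaming pass: unfold, match and parse in one loop, returning
--     # the first parseable TRIGGER value without building intermediate lists.
--     buf = None
--     for raw in (data or "").splitlines():
--         if raw[:1] in (" ", "\t") and buf is not None:
--             buf += raw[1:]
--         else:
--             if buf is not None:
--                 r = _try_trigger_line(buf)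
--                 if r is not None:
--                     return r
--             buf = raw
--     if buf is not None:
--         r = _try_trigger_line(buf)
--         if r is not None:
--             return r
--     return 0
-- ===== Notes on version B (the rewrite author's own statement) =====
-- stated objective: alternative
-- what changed: Replaced the three-stage pipeline (unfold all lines into a list, collect all TRIGGER values into a second list, then scan that list) by a single streaming pass that keeps only the current logical line in a buffer, matches and parses each completed line as it is flushed, and returns the first parseable trigger immediately without building any intermediate lists.
import Mathlib
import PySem

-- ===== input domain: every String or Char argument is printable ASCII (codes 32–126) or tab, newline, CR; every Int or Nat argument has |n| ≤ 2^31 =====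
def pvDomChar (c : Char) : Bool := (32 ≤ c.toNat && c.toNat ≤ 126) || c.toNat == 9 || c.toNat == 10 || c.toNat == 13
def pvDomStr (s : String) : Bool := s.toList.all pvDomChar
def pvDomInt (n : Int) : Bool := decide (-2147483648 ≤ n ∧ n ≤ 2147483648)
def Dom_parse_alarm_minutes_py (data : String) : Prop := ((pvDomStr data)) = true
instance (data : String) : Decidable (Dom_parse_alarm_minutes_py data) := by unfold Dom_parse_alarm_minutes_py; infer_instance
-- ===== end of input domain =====

-- B fuses unfold/extract/parse into one streaming pass with early return (objective: alternative decomposition; same value proved).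

-- shared literal constants / tiny primitives (both Pythons contain these very expressions)
def pvTrigCol : List Char := ['T','R','I','G','G','E','R',':']
def pvTrigSemi : List Char := ['T','R','I','G','G','E','R',';']
-- raw_line[:1] in {" ", "\t"}  (raw[:1] with nonnegative bounds is take 1 — exact)
def pvIsCont (raw : List Char) : Bool := raw.take 1 == [' '] || raw.take 1 == ['\t']
-- line.split(":", 1)[1]; callers guarantee ":" in line, so the second piece exists
def pvSplitSecond (line : List Char) : List Char :=
  match PySem.Chars.splitOnMax line [':'] 1 with
  | _ :: v :: _ => v
  | _ => []  -- unreachable: ':' ∈ line gives at least two pieces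

-- ===== PORT A =====
-- _ics_lines: fold over splitlines; 'unfolded[-1] += raw_line[1:]' is dropLast ++ [getLast! ++ drop 1]
def pvUnfold1 (acc : List (List Char)) (raw : List Char) : List (List Char) :=
  if pvIsCont raw && !(acc == []) then acc.dropLast ++ [acc.getLast! ++ raw.drop 1]
  else acc ++ [raw]

def pvIcsLines (data : String) : List (List Char) :=
  (PySem.Chars.splitlines data.toList).foldl pvUnfold1 []

-- _extract_ics_fields (field kept as a parameter, as in the Python)
def pvExtractFields (data : String) (field : List Char) : List (List Char) :=
  (pvIcsLines data).foldl (fun values raw =>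
    let line := PySem.Chars.strip raw
    if PySem.Chars.startswith line (field ++ [':']) then
      values ++ [PySem.Chars.strip (line.drop (field ++ [':']).length)]
    else if PySem.Chars.startswith line (field ++ [';']) && PySem.Chars.isIn [':'] line then
      values ++ [PySem.Chars.strip (pvSplitSecond line)]
    else values) []

-- body of A's final loop: text = value.strip().upper(); guarded int(text[3:-1]) (ValueError -> none)
def pvTryParse (value : List Char) : Option Int :=
  let text := PySem.Chars.upper (PySem.Chars.strip value)
  if PySem.Chars.startswith text ['-','P','T'] && PySem.Chars.endswith text ['M'] then
    PySem.Int.ofChars? (PySem.List.slice text (some 3) (some (-1)))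
  else none

-- the for-loop with early return over the extracted values
def pvFirstParse : List (List Char) → Int
  | [] => 0
  | v :: rest =>
    match pvTryParse v with
    | some n => n
    | none => pvFirstParse rest

def parse_alarm_minutes_py (data : String) : Int :=
  pvFirstParse (pvExtractFields data ['T','R','I','G','G','E','R'])

-- ===== PORT B =====
-- B's _try_trigger_line: match one logical line and parse it, in one place
def pvTryLine (line0 : List Char) : Option Int :=
  let line := PySem.Chars.strip line0
  if PySem.Chars.startswith line pvTrigCol then
    pvTryParse (line.drop pvTrigCol.length)
  else if PySem.Chars.startswith line pvTrigSemi && PySem.Chars.isIn [':'] line then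
    pvTryParse (pvSplitSecond line)
  else none

-- B's streaming loop: buf is the pending logical line; flush = try it, early return
def pvGo : List (List Char) → Option (List Char) → Int
  | [], none => 0
  | [], some b =>
    (match pvTryLine b with
     | some n => n
     | none => 0)
  | l :: rest, buf =>
    if pvIsCont l && buf.isSome then
      pvGo rest (some (buf.getD [] ++ l.drop 1))
    else
      match buf with
      | some b =>
        (match pvTryLine b with
         | some n => n
         | none => pvGo rest (some l))
      | none => pvGo rest (some l)

def parse_alarm_minutes_py_alt (data : String) : Int :=
  pvGo (PySem.Chars.splitlines data.toList) none

-- ===== PRECONDITION & SPEC =====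
def Spec_parse_alarm_minutes_py (data : String) (out : Int) : Prop := out = parse_alarm_minutes_py_alt data
instance (data : String) (out : Int) : Decidable (Spec_parse_alarm_minutes_py data out) := by unfold Spec_parse_alarm_minutes_py; infer_instance

-- ===== CLAIM (what is proved, stated in full; the proofs are below) =====
def Claim_equal_parse_alarm_minutes_py : Prop := ∀ (data : String), Dom_parse_alarm_minutes_py data → Spec_parse_alarm_minutes_py data (parse_alarm_minutes_py data)

-- ===== LEMMAS AND PROOFS =====

-- the value(s) one logical line contributes in A's _extract_ics_fields (TRIGGER instance)
def pvGVal (raw : List Char) : List (List Char) :=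
  let line := PySem.Chars.strip raw
  if PySem.Chars.startswith line pvTrigCol then
    [PySem.Chars.strip (line.drop pvTrigCol.length)]
  else if PySem.Chars.startswith line pvTrigSemi && PySem.Chars.isIn [':'] line then
    [PySem.Chars.strip (pvSplitSecond line)]
  else []

theorem pv_lstrip_rstrip_of_lstripped (p : Char → Bool) (t : List Char)
    (h : List.dropWhile p t = t) :
    List.dropWhile p ((List.dropWhile p t.reverse).reverse) = (List.dropWhile p t.reverse).reverse := by
  rw [List.dropWhile_eq_self_iff] at h ⊢
  intro hl
  have hpre : (List.dropWhile p t.reverse).reverse <+: t := by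
    simpa using (List.dropWhile_suffix (l := t.reverse) p).reverse
  have hlen : 0 < t.length := lt_of_lt_of_le hl hpre.length_le
  rw [hpre.getElem (i := 0) hl]
  exact h hlen

theorem pv_strip_idem (s : List Char) : PySem.Chars.strip (PySem.Chars.strip s) = PySem.Chars.strip s := by
  simp only [PySem.Chars.strip, PySem.Chars.lstrip, PySem.Chars.rstrip]
  generalize hA : List.dropWhile PySem.Chars.isspace s = A
  have h1 : List.dropWhile PySem.Chars.isspace ((List.dropWhile PySem.Chars.isspace A.reverse).reverse)
      = (List.dropWhile PySem.Chars.isspace A.reverse).reverse :=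
    pv_lstrip_rstrip_of_lstripped _ _ (by rw [← hA]; exact List.dropWhile_idempotent _ _)
  rw [h1, List.reverse_reverse, List.dropWhile_idempotent]

theorem pv_tryParse_strip (v : List Char) : pvTryParse (PySem.Chars.strip v) = pvTryParse v := by
  simp [pvTryParse, pv_strip_idem]

theorem pv_tryLine_eq (b : List Char) :
    pvTryLine b = (match pvGVal b with | [] => none | v :: _ => pvTryParse v) := by
  simp only [pvTryLine, pvGVal]
  split_ifs <;> simp [pv_tryParse_strip]

theorem pv_extract_eq (data : String) :
    pvExtractFields data ['T','R','I','G','G','E','R'] = (pvIcsLines data).flatMap pvGVal := by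
  unfold pvExtractFields
  have hf : (fun (values : List (List Char)) (raw : List Char) =>
      let line := PySem.Chars.strip raw
      if PySem.Chars.startswith line (['T','R','I','G','G','E','R'] ++ [':']) then
        values ++ [PySem.Chars.strip (line.drop (['T','R','I','G','G','E','R'] ++ [':']).length)]
      else if PySem.Chars.startswith line (['T','R','I','G','G','E','R'] ++ [';']) && PySem.Chars.isIn [':'] line then
        values ++ [PySem.Chars.strip (pvSplitSecond line)]
      else values) = (fun acc x => acc ++ pvGVal x) := by
    funext values raw
    simp only [pvGVal, pvTrigCol, pvTrigSemi, List.cons_append, List.nil_append]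
    split_ifs <;> simp
  rw [hf]
  simpa using PySem.List.foldl_append_eq_flatMap pvGVal (l := pvIcsLines data) (acc := [])

theorem pv_getLast!_append (d acc : List (List Char)) (h : acc ≠ []) :
    (d ++ acc).getLast! = acc.getLast! := by
  rw [List.getLast!_eq_getLast?_getD, List.getLast!_eq_getLast?_getD, List.getLast?_append]
  cases hl : acc.getLast? with
  | none => exact absurd (List.getLast?_eq_none_iff.mp hl) h
  | some x => rfl

theorem pv_foldl_unfold_append (lines : List (List Char)) :
    ∀ (d acc : List (List Char)), acc ≠ [] →
      lines.foldl pvUnfold1 (d ++ acc) = d ++ lines.foldl pvUnfold1 acc := by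
  induction lines with
  | nil => intro d acc h; simp
  | cons l rest ih =>
    intro d acc h
    have hstep : pvUnfold1 (d ++ acc) l = d ++ pvUnfold1 acc l := by
      unfold pvUnfold1
      by_cases hc : pvIsCont l = true
      · simp only [hc, Bool.not_eq_true', Bool.true_and]
        rw [if_pos, if_pos]
        · rw [List.dropLast_append_of_ne_nil h, pv_getLast!_append d acc h, List.append_assoc]
        · simp [h]
        · simp [h]
      · simp [hc]
    have hne : pvUnfold1 acc l ≠ [] := by
      unfold pvUnfold1; split_ifs <;> simp
    simp only [List.foldl_cons, hstep]
    exact ih d (pvUnfold1 acc l) hne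

theorem pv_firstParse_append (b : List Char) (r : List (List Char)) :
    pvFirstParse (pvGVal b ++ r) =
      (match pvTryLine b with
       | some n => n
       | none => pvFirstParse r) := by
  rw [pv_tryLine_eq]
  simp only [pvGVal]
  split_ifs <;> simp [pvFirstParse]

theorem pv_go_some (lines : List (List Char)) :
    ∀ (b : List Char),
      pvGo lines (some b) = pvFirstParse ((lines.foldl pvUnfold1 [b]).flatMap pvGVal) := by
  induction lines with
  | nil =>
    intro b
    simp only [List.foldl_nil, List.flatMap_cons, List.flatMap_nil, List.append_nil]
    rw [pvGo, pv_tryLine_eq]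
    simp only [pvGVal]
    split_ifs <;> simp [pvFirstParse]
  | cons l rest ih =>
    intro b
    by_cases hc : pvIsCont l = true
    · have h1 : pvUnfold1 [b] l = [b ++ l.drop 1] := by simp [pvUnfold1, hc]
      rw [pvGo]
      simp only [hc, Option.isSome_some, Bool.and_self, Option.getD_some,
        List.foldl_cons, h1]
      exact ih (b ++ l.drop 1)
    · have h1 : pvUnfold1 [b] l = [b] ++ [l] := by simp [pvUnfold1, hc]
      rw [pvGo]
      simp only [hc, Bool.false_and, Bool.false_eq_true, if_false, List.foldl_cons, h1]
      rw [pv_foldl_unfold_append rest [b] [l] (by simp), List.flatMap_append]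
      simp only [List.flatMap_cons, List.flatMap_nil, List.append_nil]
      rw [pv_firstParse_append]
      cases htl : pvTryLine b with
      | some n => simp
      | none => simpa using ih l

-- ===== VERDICT (by name: the statement is the Claim_ definition above) =====
theorem parse_alarm_minutes_py_spec : Claim_equal_parse_alarm_minutes_py := by
  intro data _
  unfold Spec_parse_alarm_minutes_py parse_alarm_minutes_py parse_alarm_minutes_py_alt
  rw [pv_extract_eq]
  unfold pvIcsLines
  cases hls : PySem.Chars.splitlines data.toList with
  | nil => simp [pvGo, pvFirstParse]
  | cons l rest =>
    have h0 : pvUnfold1 [] l = [l] := by simp [pvUnfold1]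
    rw [pvGo]
    simp only [Option.isSome_none, Bool.and_false, Bool.false_eq_true, if_false, List.foldl_cons, h0]
    exact (pv_go_some rest l).symm
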